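-- pv_equiv track=rewrite | github.com/zchiyu/standard_extract | toc_extract/model_parser.py | clean_toc_list
-- ===== SOURCE A (Python) =====
-- from typing import Any, Dict, List
--
-- def clean_toc_list(candidates: List[Dict[str, str]]) -> List[Dict[str, str]]:
--     """
--     清洗目录列表：
--     - 从最后一次出现 label=1 的位置开始（避免把目录页重复抓进来）
--     - label 去重
--     """
--     if not candidates:
--         return []
--
--     start_indices = [i for i, item in enumerate(candidates) if item.get("label") == "1"]
--     if start_indices:
--         candidates = candidates[start_indices[-1]:]
--
--     seen = set()
--     unique: List[Dict[str, str]] = []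
--     for item in candidates:
--         label = item.get("label")
--         if not label:
--             continue
--         if label in seen:
--             continue
--         seen.add(label)
--         unique.append(item)
--     return unique
-- ===== SOURCE B (Python) =====
-- def clean_toc_list(candidates):
--     """Recursive decomposition: a right-recursive search for the suffix starting
--     at the LAST label=="1" item, then a filter-based recursive dedup (keep the
--     head, recurse on the tail with the head's label filtered out)."""
--     tail = _suffix_from_last_one(candidates)
--     if tail is None:
--         tail = candidates
--     return _dedup(tail)
--
--
-- def _suffix_from_last_one(items):
--     """The suffix of items starting at the last item whose label is "1" (None if absent)."""
--     if not items:
--         return None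
--     rest = _suffix_from_last_one(items[1:])
--     if rest is not None:
--         return rest
--     return items if items[0].get("label") == "1" else None
--
--
-- def _dedup(items):
--     """Keep the first item of each truthy label; drop falsy-label items."""
--     if not items:
--         return []
--     head, rest = items[0], items[1:]
--     label = head.get("label")
--     if not label:
--         return _dedup(rest)
--     return [head] + _dedup([it for it in rest if it.get("label") != label])
-- ===== Notes on version B (the rewrite author's own statement) =====
-- stated objective: alternative
-- what changed: Replaced A's enumerate/index-list/slice phase and its fold with a mutable seen-set by two recursions: a right-recursive search returning the suffix after the last label '1', and a filter-based recursive dedup that needs no seen-set (it filters the head's label out of the tail before recursing).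
import Mathlib
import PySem

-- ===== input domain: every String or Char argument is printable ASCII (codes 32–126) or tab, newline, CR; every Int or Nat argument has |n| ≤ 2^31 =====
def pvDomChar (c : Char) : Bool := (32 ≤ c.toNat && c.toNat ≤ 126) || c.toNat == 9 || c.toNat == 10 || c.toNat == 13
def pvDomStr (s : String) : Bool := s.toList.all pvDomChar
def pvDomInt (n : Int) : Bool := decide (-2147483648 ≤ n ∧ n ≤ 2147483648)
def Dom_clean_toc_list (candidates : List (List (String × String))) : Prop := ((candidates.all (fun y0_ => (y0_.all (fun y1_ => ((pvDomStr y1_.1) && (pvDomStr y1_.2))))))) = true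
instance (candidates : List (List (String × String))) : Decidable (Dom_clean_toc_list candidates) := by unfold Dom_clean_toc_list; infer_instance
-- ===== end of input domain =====

-- B replaces A's enumerate/index-list/slice phase and its seen-set fold by two recursions:
-- a right-recursive search for the suffix after the last label "1", and a filter-based
-- recursive dedup with no seen-set; same return value (alternative decomposition).

-- ===== PORT A =====
-- item.get("label"): first match in the association list (Python dict lookup)
def getLabel (item : List (String × String)) : Option String :=
  (item.find? (fun p => p.1 == "label")).map Prod.snd

-- the body of A's dedup loop (seen is a Python set)
def aStep (st : PySem.Set String × List (List (String × String)))
    (item : List (String × String)) : PySem.Set String × List (List (String × String)) :=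
  match getLabel item with
  | none => st
  | some label =>
    if label = "" then st
    else if PySem.Set.contains st.1 label then st
    else (PySem.Set.add st.1 label, st.2 ++ [item])

def clean_toc_list (candidates : List (List (String × String))) : List (List (String × String)) :=
  if candidates = [] then []
  else
    let start_indices :=
      ((PySem.List.enumerate candidates 0).filter (fun p => getLabel p.2 == some "1")).map Prod.fst
    let candidates2 :=
      match start_indices.getLast? with   -- start_indices[-1], guarded by "if start_indices:"
      | some i => PySem.List.slice candidates (some i) none
      | none => candidates
    (candidates2.foldl aStep (PySem.Set.empty, [])).2

-- ===== PORT B =====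
-- item.get("label") on B's side
def labelOf (item : List (String × String)) : Option String :=
  (item.find? (fun p => p.1 == "label")).map Prod.snd

-- _suffix_from_last_one: right recursion, the suffix starting at the LAST label "1"
def suffixB : List (List (String × String)) → Option (List (List (String × String)))
  | [] => none
  | x :: xs =>
    match suffixB xs with
    | some rest => some rest
    | none => if labelOf x = some "1" then some (x :: xs) else none

-- _dedup: keep the head of each truthy label, recurse on the tail with that label filtered out
def dedupB : List (List (String × String)) → List (List (String × String))
  | [] => []
  | head :: rest =>
    match labelOf head with
    | none => dedupB rest
    | some label =>
      if label = "" then dedupB rest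
      else [head] ++ dedupB (rest.filter (fun it => !(labelOf it == some label)))
termination_by items => items.length
decreasing_by
  all_goals simp only [List.length_cons, Nat.lt_succ_iff]
  all_goals first
    | (simp only [List.length_unattach]
       exact le_trans (List.length_filter_le _ _) (by simp))
    | omega

def clean_toc_list_alt (candidates : List (List (String × String))) : List (List (String × String)) :=
  dedupB (match suffixB candidates with
          | some tail => tail
          | none => candidates)

-- ===== PRECONDITION & SPEC =====
def Spec_clean_toc_list (candidates : List (List (String × String))) (out : List (List (String × String))) : Prop := out = clean_toc_list_alt candidates
instance (candidates : List (List (String × String))) (out : List (List (String × String))) : Decidable (Spec_clean_toc_list candidates out) := by unfold Spec_clean_toc_list; infer_instance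

-- ===== CLAIM (what is proved, stated in full; the proofs are below) =====
def Claim_equal_clean_toc_list : Prop := ∀ (candidates : List (List (String × String))), Dom_clean_toc_list candidates → Spec_clean_toc_list candidates (clean_toc_list candidates)

-- ===== LEMMAS AND PROOFS =====

lemma labelOf_eq_getLabel : labelOf = getLabel := rfl

-- seen-set dedup with an explicit seen list (reference form between the two ports;
-- a missing label behaves like "": both are skipped)
def dedupS (seen : List String) : List (List (String × String)) → List (List (String × String))
  | [] => []
  | x :: xs =>
    if (getLabel x).getD "" = "" then dedupS seen xs
    else if (getLabel x).getD "" ∈ seen then dedupS seen xs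
    else x :: dedupS ((getLabel x).getD "" :: seen) xs

lemma dedupS_congr (xs : List (List (String × String))) :
    ∀ (s1 s2 : List String), (∀ a, a ∈ s1 ↔ a ∈ s2) → dedupS s1 xs = dedupS s2 xs := by
  induction xs with
  | nil => intro s1 s2 _; rfl
  | cons x xs ih =>
    intro s1 s2 h
    simp only [dedupS]
    by_cases hL : (getLabel x).getD "" = ""
    · simp only [if_pos hL]; exact ih s1 s2 h
    · by_cases hm : (getLabel x).getD "" ∈ s1
      · simp only [if_neg hL, if_pos hm, if_pos ((h _).mp hm)]; exact ih s1 s2 h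
      · simp only [if_neg hL, if_neg hm, if_neg (fun hc => hm ((h _).mpr hc))]
        rw [ih ((getLabel x).getD "" :: s1) ((getLabel x).getD "" :: s2)
          (by intro a; simp [h a])]

-- A's fold with a PySem.Set equals dedupS with any membership-equivalent seen list
lemma fold_aStep_char (xs : List (List (String × String))) :
    ∀ (s : PySem.Set String) (seen : List String) (acc : List (List (String × String))),
      (∀ a, a ∈ s ↔ a ∈ seen) →
      (xs.foldl aStep (s, acc)).2 = acc ++ dedupS seen xs := by
  induction xs with
  | nil => intro s seen acc _; simp [dedupS]
  | cons x xs ih =>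
    intro s seen acc h
    rw [List.foldl_cons]
    cases hgl : getLabel x with
    | none =>
      have hstep : aStep (s, acc) x = (s, acc) := by unfold aStep; rw [hgl]
      rw [hstep]
      simp only [dedupS, hgl, Option.getD_none]
      exact ih s seen acc h
    | some l =>
      by_cases hl : l = ""
      · have hstep : aStep (s, acc) x = (s, acc) := by unfold aStep; rw [hgl]; simp [hl]
        rw [hstep]
        simp only [dedupS, hgl, Option.getD_some, if_pos hl]
        exact ih s seen acc h
      · by_cases hm : l ∈ seen
        · have hcs : PySem.Set.contains s l = true :=
            (PySem.Set.contains_iff s l).mpr ((h l).mpr hm)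
          have hstep : aStep (s, acc) x = (s, acc) := by
            unfold aStep; rw [hgl]; simp only [if_neg hl]
            rw [if_pos (by simpa using hcs)]
          rw [hstep]
          simp only [dedupS, hgl, Option.getD_some, if_neg hl, if_pos hm]
          exact ih s seen acc h
        · have hcs : ¬ (PySem.Set.contains s l = true) := by
            intro hc; exact hm ((h l).mp ((PySem.Set.contains_iff s l).mp hc))
          have hstep : aStep (s, acc) x = (PySem.Set.add s l, acc ++ [x]) := by
            unfold aStep; rw [hgl]; simp only [if_neg hl]
            rw [if_neg (by simpa using hcs)]
          rw [hstep]
          simp only [dedupS, hgl, Option.getD_some, if_neg hl, if_neg hm]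
          rw [ih (PySem.Set.add s l) (l :: seen) (acc ++ [x])
            (by intro a; rw [PySem.Set.mem_add]; simp [h a, List.mem_cons, or_comm])]
          simp

-- adding a label to seen = filtering that label out of the rest of the list
lemma dedupS_cons_filter (xs : List (List (String × String))) :
    ∀ (l : String) (seen : List String),
      dedupS (l :: seen) xs = dedupS seen (xs.filter (fun it => !(getLabel it == some l))) := by
  induction xs with
  | nil => intro l seen; rfl
  | cons x xs ih =>
    intro l seen
    by_cases hx : getLabel x = some l
    · have hdrop : (!(getLabel x == some l)) = false := by simp [hx]
      rw [List.filter_cons, hdrop]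
      simp only [Bool.false_eq_true, if_false]
      by_cases hl : l = ""
      · simp only [dedupS, hx, Option.getD_some, if_pos hl]; exact ih l seen
      · have hmem : l ∈ l :: seen := by simp
        simp only [dedupS, hx, Option.getD_some, if_neg hl, if_pos hmem]; exact ih l seen
    · rw [List.filter_cons, if_pos (by simp [hx])]
      cases hgl : getLabel x with
      | none =>
        simp only [dedupS, hgl, Option.getD_none]
        exact ih l seen
      | some l' =>
        have hne : l' ≠ l := by intro he; exact hx (by rw [hgl, he])
        by_cases hl' : l' = ""
        · simp only [dedupS, hgl, Option.getD_some, if_pos hl']; exact ih l seen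
        · by_cases hm : l' ∈ seen
          · have h2 : l' ∈ l :: seen := by simp [hm]
            simp only [dedupS, hgl, Option.getD_some, if_neg hl', if_pos hm, if_pos h2]
            exact ih l seen
          · have hnotm : l' ∉ l :: seen := by simp [hne, hm]
            simp only [dedupS, hgl, Option.getD_some, if_neg hl', if_neg hm, if_neg hnotm]
            rw [dedupS_congr xs (l' :: l :: seen) (l :: l' :: seen) (by intro a; simp; tauto),
              ih l (l' :: seen)]

-- B's filter-based recursive dedup equals dedupS with an empty seen list
lemma dedupB_eq_dedupS (xs : List (List (String × String))) : dedupB xs = dedupS [] xs := by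
  induction xs using dedupB.induct with
  | case1 => simp [dedupB, dedupS]
  | case2 head rest hgl ih =>
    have hg : getLabel head = none := hgl
    simp only [dedupB, hgl, dedupS, hg, Option.getD_none]
    simpa using ih
  | case3 head rest hgl ih =>
    have hg : getLabel head = some "" := hgl
    simp only [dedupB, hgl, dedupS, hg, Option.getD_some]
    simpa using ih
  | case4 head rest label hgl hl ih =>
    have hg : getLabel head = some label := hgl
    have ih' : dedupB (rest.filter (fun it => !(getLabel it == some label)))
        = dedupS [] (rest.filter (fun it => !(getLabel it == some label))) := by
      rw [List.unattach_filter (g := fun it => !(getLabel it == some label))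
            (hf := fun x h => rfl),
          List.unattach_attach] at ih
      exact ih
    simp only [dedupB, labelOf_eq_getLabel, hg, if_neg hl]
    rw [ih', ← dedupS_cons_filter rest label [],
      show dedupS [] (head :: rest) = head :: dedupS [label] rest from by simp [dedupS, hg, hl]]
    rfl

lemma suffixB_eq_none_iff (xs : List (List (String × String))) :
    suffixB xs = none ↔ ∀ x ∈ xs, getLabel x ≠ some "1" := by
  induction xs with
  | nil => simp [suffixB]
  | cons x xs ih =>
    simp only [suffixB, labelOf_eq_getLabel]
    cases h : suffixB xs with
    | some t =>
      constructor
      · intro hc; simp at hc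
      · intro hall
        have := ih.mpr (fun z hz => hall z (List.mem_cons_of_mem x hz))
        rw [h] at this; simp at this
    | none =>
      constructor
      · intro hcond y hy
        rcases List.mem_cons.mp hy with hy | hy
        · intro h1; subst hy; simp [h1] at hcond
        · exact (ih.mp h) y hy
      · intro hall; simp [hall x (by simp)]

lemma suffixB_append (l : List (List (String × String))) (y : List (String × String)) :
    suffixB (l ++ [y]) =
      if getLabel y = some "1" then some [y] else (suffixB l).map (· ++ [y]) := by
  induction l with
  | nil => simp [suffixB, labelOf_eq_getLabel]
  | cons x l ih =>
    by_cases hy : getLabel y = some "1"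
    · simp [List.cons_append, suffixB, ih, hy]
    · simp only [List.cons_append, suffixB, ih, if_neg hy, labelOf_eq_getLabel]
      cases h : suffixB l with
      | some t => simp
      | none => by_cases hx : getLabel x = some "1" <;> simp [hx]

-- A's "start then slice" phase, as written in the port
def sliceLast (xs : List (List (String × String))) : List (List (String × String)) :=
  match (((PySem.List.enumerate xs 0).filter (fun p => getLabel p.2 == some "1")).map Prod.fst).getLast? with
  | some i => PySem.List.slice xs (some i) none
  | none => xs

lemma mem_startIndices {xs : List (List (String × String))} {i : Int}
    (h : i ∈ ((PySem.List.enumerate xs 0).filter (fun p => getLabel p.2 == some "1")).map Prod.fst) :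
    ∃ k : Nat, k < xs.length ∧ i = (k : Int) := by
  rcases List.mem_map.mp h with ⟨p, hp, hpi⟩
  rcases (PySem.List.mem_enumerate_iff xs 0 p).mp (List.mem_filter.mp hp).1 with ⟨k, hk, hpk⟩
  exact ⟨k, hk, by rw [← hpi, hpk]; simp⟩

lemma startIndices_nil_iff (xs : List (List (String × String))) :
    (((PySem.List.enumerate xs 0).filter (fun p => getLabel p.2 == some "1")).map Prod.fst) = []
      ↔ ∀ x ∈ xs, getLabel x ≠ some "1" := by
  rw [List.map_eq_nil_iff, List.filter_eq_nil_iff]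
  constructor
  · intro h x hx he
    have hx2 : x ∈ (PySem.List.enumerate xs 0).map (·.2) := by
      rw [PySem.List.map_snd_enumerate]; exact hx
    rcases List.mem_map.mp hx2 with ⟨p, hp, hpx⟩
    exact h p hp (by simp [hpx, he])
  · intro h p hp
    rcases (PySem.List.mem_enumerate_iff xs 0 p).mp hp with ⟨k, hk, hpk⟩
    subst hpk
    simpa using h _ (xs.getElem_mem hk)

lemma sliceLast_eq (xs : List (List (String × String))) :
    sliceLast xs = (suffixB xs).getD xs := by
  induction xs using List.reverseRecOn with
  | nil => rfl
  | append_singleton l y ih =>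
    have henum : PySem.List.enumerate (l ++ [y]) 0
        = PySem.List.enumerate l 0 ++ [((0 + l.length : Int), y)] := by
      rw [PySem.List.enumerate_append]
      simp [PySem.List.enumerate_cons]
    rw [suffixB_append]
    by_cases hy : getLabel y = some "1"
    · have hSapp : (((PySem.List.enumerate (l ++ [y]) 0).filter (fun p => getLabel p.2 == some "1")).map Prod.fst)
          = (((PySem.List.enumerate l 0).filter (fun p => getLabel p.2 == some "1")).map Prod.fst) ++ [((l.length : Nat) : Int)] := by
        rw [henum, List.filter_append, List.map_append]
        simp [hy]
      unfold sliceLast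
      rw [hSapp, List.getLast?_concat]
      show PySem.List.slice (l ++ [y]) (some ((l.length : Nat) : Int)) none = _
      rw [PySem.List.slice_from_natCast, List.drop_left]
      simp [hy]
    · have hSapp : (((PySem.List.enumerate (l ++ [y]) 0).filter (fun p => getLabel p.2 == some "1")).map Prod.fst)
          = (((PySem.List.enumerate l 0).filter (fun p => getLabel p.2 == some "1")).map Prod.fst) := by
        rw [henum, List.filter_append, List.map_append]
        simp [hy]
      unfold sliceLast
      rw [hSapp, if_neg hy]
      cases hS : (((PySem.List.enumerate l 0).filter (fun p => getLabel p.2 == some "1")).map Prod.fst).getLast? with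
      | none =>
        have hnil := List.getLast?_eq_none_iff.mp hS
        have hnone : suffixB l = none :=
          (suffixB_eq_none_iff l).mpr ((startIndices_nil_iff l).mp hnil)
        simp [hnone]
      | some i =>
        rcases mem_startIndices (List.mem_of_getLast? hS) with ⟨k, hk, hik⟩
        subst hik
        have ihk : PySem.List.slice l (some ((k : Nat) : Int)) none = (suffixB l).getD l := by
          have h2 := ih; unfold sliceLast at h2; rw [hS] at h2; exact h2
        cases ht : suffixB l with
        | none =>
          have hnil : (((PySem.List.enumerate l 0).filter (fun p => getLabel p.2 == some "1")).map Prod.fst) = [] :=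
            (startIndices_nil_iff l).mpr ((suffixB_eq_none_iff l).mp ht)
          rw [hnil] at hS; simp at hS
        | some t =>
          rw [ht] at ihk
          simp only [Option.map_some, Option.getD_some] at ihk ⊢
          show PySem.List.slice (l ++ [y]) (some ((k : Nat) : Int)) none = t ++ [y]
          rw [PySem.List.slice_from_natCast] at ihk ⊢
          rw [List.drop_append_of_le_length (Nat.le_of_lt hk), ihk]

-- ===== VERDICT (by name: the statement is the Claim_ definition above) =====
theorem clean_toc_list_spec : Claim_equal_clean_toc_list := by
  intro xs _
  unfold Spec_clean_toc_list clean_toc_list_alt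
  rw [show (match suffixB xs with | some tail => tail | none => xs) = (suffixB xs).getD xs by
        cases suffixB xs <;> rfl,
      ← sliceLast_eq, dedupB_eq_dedupS]
  unfold clean_toc_list
  by_cases hnil : xs = []
  · subst hnil; rfl
  · simp only [if_neg hnil]
    rw [show (match (((PySem.List.enumerate xs 0).filter (fun p => getLabel p.2 == some "1")).map Prod.fst).getLast? with
      | some i => PySem.List.slice xs (some i) none
      | none => xs) = sliceLast xs from rfl]
    rw [fold_aStep_char (sliceLast xs) PySem.Set.empty [] [] (by simp [PySem.Set.empty])]
    simp
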